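-- pv_equiv track=rewrite | github.com/layup/compound_reports | Post_Generate/cannabisReport.py | generateSampleSectionNames
-- ===== SOURCE A (Python) =====
-- def generateSampleSectionNames(samples, sampleNames, unitType):
--
--     if(unitType in [0,1,2]):
--         tableTotalSamples = 2
--     else:
--         tableTotalSamples = 4;
--
--     currentWord = ''
--     headerNames = []
--
--     for i, sample in enumerate(samples, 1):
--
--         if sample in sampleNames:
--             currentWord += str(i) + ") " +  sampleNames[sample].strip() + " "
--         else:
--             currentWord += str(i) + ")" + sample + ' '
--
--         if(i % tableTotalSamples == 0):
--             headerNames.append(currentWord)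
--             currentWord = ''
--
--     if(currentWord != ''):
--         headerNames.append(currentWord)
--
--     return headerNames;
-- ===== SOURCE B (Python) =====
-- def generateSampleSectionNames(samples, sampleNames, unitType):
--     t = 2 if unitType in [0, 1, 2] else 4
--     formatted = [
--         str(i) + ") " + sampleNames[sample].strip() + " "
--         if sample in sampleNames
--         else str(i) + ")" + sample + ' '
--         for i, sample in enumerate(samples, 1)
--     ]
--     return [''.join(formatted[j:j + t]) for j in range(0, len(formatted), t)]
-- ===== Notes on version B (the rewrite author's own statement) =====
-- stated objective: simpler
-- what changed: Replaces the single stateful loop (accumulator string, i % t flush, trailing-remainder append) by two comprehensions: format every sample first, then chunk the formatted list with index slices and ''.join.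
import Mathlib
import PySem

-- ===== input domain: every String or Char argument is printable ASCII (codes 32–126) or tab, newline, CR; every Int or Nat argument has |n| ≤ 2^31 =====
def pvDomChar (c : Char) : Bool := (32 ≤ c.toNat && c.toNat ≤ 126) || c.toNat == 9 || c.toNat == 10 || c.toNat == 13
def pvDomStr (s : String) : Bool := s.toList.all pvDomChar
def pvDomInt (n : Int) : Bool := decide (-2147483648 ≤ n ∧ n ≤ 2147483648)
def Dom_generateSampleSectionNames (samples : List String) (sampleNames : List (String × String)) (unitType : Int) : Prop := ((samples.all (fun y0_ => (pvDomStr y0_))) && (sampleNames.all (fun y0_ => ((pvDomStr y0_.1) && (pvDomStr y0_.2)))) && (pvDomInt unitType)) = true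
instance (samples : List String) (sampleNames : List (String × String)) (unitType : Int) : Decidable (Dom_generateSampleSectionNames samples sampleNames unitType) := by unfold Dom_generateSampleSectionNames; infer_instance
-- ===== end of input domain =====

-- B splits A's single stateful accumulator loop into a format pass plus slice-based chunking (objective: simpler); return values proved equal on the whole domain.

-- ===== PORT A =====
-- A's for-loop over enumerate(samples, 1): state = (currentWord, headerNames), flush on i % t == 0, trailing flush after the loop.
def gssnA_loop (sampleNames : List (String × String)) (t : Int) :
    List String → Int → String → List String → List String
  | [], _, cur, acc => if cur ≠ "" then acc ++ [cur] else acc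
  | s :: ss, i, cur, acc =>
    let cur1 :=
      match sampleNames.lookup s with
      | some v => cur ++ (PySem.Int.toStr i ++ ") " ++ PySem.Str.strip v ++ " ")
      | none   => cur ++ (PySem.Int.toStr i ++ ")" ++ s ++ " ")
    if PySem.Int.mod i t == 0 then gssnA_loop sampleNames t ss (i + 1) "" (acc ++ [cur1])
    else gssnA_loop sampleNames t ss (i + 1) cur1 acc

def generateSampleSectionNames (samples : List String) (sampleNames : List (String × String)) (unitType : Int) : List String :=
  let tableTotalSamples : Int := if unitType ∈ ([0, 1, 2] : List Int) then 2 else 4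
  gssnA_loop sampleNames tableTotalSamples samples 1 "" []

-- ===== PORT B =====
-- the formatting comprehension's body
def gssnFmt (sampleNames : List (String × String)) (p : Int × String) : String :=
  match sampleNames.lookup p.2 with
  | some v => PySem.Int.toStr p.1 ++ ") " ++ PySem.Str.strip v ++ " "
  | none   => PySem.Int.toStr p.1 ++ ")" ++ p.2 ++ " "

def generateSampleSectionNames_alt (samples : List String) (sampleNames : List (String × String)) (unitType : Int) : List String :=
  let t : Int := if unitType ∈ ([0, 1, 2] : List Int) then 2 else 4
  let formatted := (PySem.List.enumerate samples 1).map (gssnFmt sampleNames)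
  (PySem.List.pyRange 0 (PySem.List.len formatted) t).foldl
    (fun acc j => acc ++ [PySem.Str.join "" (PySem.List.slice formatted (some j) (some (j + t)))]) []

-- ===== PRECONDITION & SPEC =====
def Spec_generateSampleSectionNames (samples : List String) (sampleNames : List (String × String)) (unitType : Int) (out : List String) : Prop := out = generateSampleSectionNames_alt samples sampleNames unitType
instance (samples : List String) (sampleNames : List (String × String)) (unitType : Int) (out : List String) : Decidable (Spec_generateSampleSectionNames samples sampleNames unitType out) := by unfold Spec_generateSampleSectionNames; infer_instance

-- ===== CLAIM (what is proved, stated in full; the proofs are below) =====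
def Claim_equal_generateSampleSectionNames : Prop := ∀ (samples : List String) (sampleNames : List (String × String)) (unitType : Int), Dom_generateSampleSectionNames samples sampleNames unitType → Spec_generateSampleSectionNames samples sampleNames unitType (generateSampleSectionNames samples sampleNames unitType)

-- ===== LEMMAS AND PROOFS =====

-- string basics
theorem pv_append_ne_empty (s w : String) (h : s ≠ "") : s ++ w ≠ "" := by
  intro hc
  apply h
  apply String.toList_inj.mp
  have h2 := congrArg String.toList hc
  rw [String.toList_append] at h2
  simp at h2
  rw [h2.1]

theorem pv_sjoin_cons (w : String) (ws : List String) :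
    PySem.Str.join "" (w :: ws) = w ++ PySem.Str.join "" ws := by
  apply String.toList_inj.mp
  cases ws with
  | nil => simp [PySem.Str.toList_join, PySem.Chars.join_singleton, PySem.Chars.join_nil, String.toList_append]
  | cons x xs =>
      simp [PySem.Str.toList_join, PySem.Chars.join_cons_cons, String.toList_append]

theorem pv_sjoin_nil : PySem.Str.join "" ([] : List String) = "" := by
  apply String.toList_inj.mp
  simp [PySem.Str.toList_join, PySem.Chars.join_nil]

theorem pv_fmt_ne (sampleNames : List (String × String)) (p : Int × String) :
    gssnFmt sampleNames p ≠ "" := by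
  unfold gssnFmt
  cases h : sampleNames.lookup p.2 with
  | some v =>
      simp only []
      intro hc
      have h2 := congrArg String.toList hc
      simp [String.toList_append] at h2
  | none =>
      simp only []
      intro hc
      have h2 := congrArg String.toList hc
      simp [String.toList_append] at h2

-- the A loop over the pre-formatted words
def wloop (t : Int) : List String → Int → String → List String → List String
  | [], _, cur, acc => if cur ≠ "" then acc ++ [cur] else acc
  | w :: ws, i, cur, acc =>
    if PySem.Int.mod i t == 0 then wloop t ws (i + 1) "" (acc ++ [cur ++ w])
    else wloop t ws (i + 1) (cur ++ w) acc

theorem pv_Aloop_eq_wloop (sampleNames : List (String × String)) (t : Int) :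
    ∀ (ss : List String) (i : Int) (cur : String) (acc : List String),
      gssnA_loop sampleNames t ss i cur acc
        = wloop t ((PySem.List.enumerate ss i).map (gssnFmt sampleNames)) i cur acc := by
  intro ss
  induction ss with
  | nil => intro i cur acc; simp [gssnA_loop, PySem.List.enumerate, wloop]
  | cons s ss ih =>
      intro i cur acc
      rw [PySem.List.enumerate_cons]
      simp only [List.map_cons, gssnA_loop, wloop, gssnFmt]
      cases h : sampleNames.lookup s with
      | some v => simp [ih]
      | none => simp [ih]

-- chunking with chunk size tm+1 (B's semantics, recursion on the list)
def chunks (tm : Nat) : List String → List String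
  | [] => []
  | w :: ws => PySem.Str.join "" (List.take (tm + 1) (w :: ws)) :: chunks tm (List.drop tm ws)
  termination_by ws => ws.length
  decreasing_by simp

-- main invariant: the stateful flush loop produces exactly the chunks
theorem pv_wloop_chunks (tm : Nat) (h1 : 1 ≤ tm) :
    ∀ (n : Nat) (ws : List String), ws.length = n → (∀ w ∈ ws, w ≠ "") →
      ((∀ (i : Int) (acc : List String), 1 ≤ i → ((tm : Int) + 1) ∣ (i - 1) →
          wloop ((tm : Int) + 1) ws i "" acc = acc ++ chunks tm ws)
       ∧ (∀ (k : Nat), 1 ≤ k → k ≤ tm + 1 →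
          ∀ (cur : String) (acc : List String) (i : Int), cur ≠ "" → 1 ≤ i →
            ((tm : Int) + 1) ∣ (i + (k : Int) - 1) →
            wloop ((tm : Int) + 1) ws i cur acc =
              if ws.length < k then acc ++ [cur ++ PySem.Str.join "" ws]
              else (acc ++ [cur ++ PySem.Str.join "" (ws.take k)]) ++ chunks tm (ws.drop k))) := by
  intro n
  induction n using Nat.strong_induction_on with
  | _ n IH =>
    intro ws hlen hne
    have hmod : ∀ j : Int, PySem.Int.mod j ((tm : Int) + 1) = j % ((tm : Int) + 1) :=
      fun j => PySem.Int.mod_eq_emod_of_pos (by omega)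
    constructor
    · -- aligned part
      intro i acc hi hdvd
      cases ws with
      | nil => simp [wloop, chunks]
      | cons w ws' =>
        have hne0 : ¬ i % ((tm : Int) + 1) = 0 := by
          intro h0
          have hdi : ((tm : Int) + 1) ∣ i := Int.dvd_of_emod_eq_zero h0
          have h1' : ((tm : Int) + 1) ∣ (i - (i - 1)) := Int.dvd_sub hdi hdvd
          simp only [sub_sub_cancel] at h1'
          have := Int.le_of_dvd (by omega) h1'
          omega
        simp only [wloop, hmod, hne0, beq_iff_eq, if_false]
        have hw : w ≠ "" := hne w (by simp)
        have hcons := (IH ws'.length (by simp [← hlen]) ws' rfl (fun x hx => hne x (by simp [hx]))).2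
          tm h1 (by omega) ("" ++ w) acc (i + 1)
          (by simpa using pv_append_ne_empty w "" (by simpa using hw))
          (by omega)
          (by
            have he : (i + 1 + (tm : Int) - 1) = (i - 1) + ((tm : Int) + 1) := by ring
            rw [he]
            exact dvd_add hdvd dvd_rfl)
        rw [hcons]
        by_cases hlt : ws'.length < tm
        · rw [if_pos hlt]
          rw [chunks]
          rw [List.drop_eq_nil_of_le (by omega)]
          rw [List.take_of_length_le (by simp; omega)]
          rw [chunks]
          simp [pv_sjoin_cons]
        · rw [if_neg hlt]
          rw [chunks]
          rw [List.take_succ_cons]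
          simp [pv_sjoin_cons]
    · -- consume part
      intro k hk1 hk2 cur acc i hcur hi hdvd
      cases ws with
      | nil =>
        simp only [wloop, if_pos hcur, List.length_nil]
        rw [if_pos (by omega)]
        simp [pv_sjoin_nil]
      | cons w ws' =>
        cases k with
        | zero => omega
        | succ k' =>
          cases Nat.eq_zero_or_pos k' with
          | inl hk0 =>
            subst hk0
            have hdvd' : ((tm : Int) + 1) ∣ i := by
              have he : (i + ((1 : Nat) : Int) - 1) = i := by push_cast; ring
              rwa [he] at hdvd
            have h0 : i % ((tm : Int) + 1) = 0 := Int.emod_eq_zero_of_dvd hdvd'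
            simp only [wloop, hmod, h0, beq_self_eq_true, if_true]
            have halign := (IH ws'.length (by simp [← hlen]) ws' rfl
                (fun x hx => hne x (by simp [hx]))).1 (i + 1) (acc ++ [cur ++ w])
                (by omega) (by simpa using hdvd')
            rw [halign]
            rw [if_neg (by simp)]
            simp [pv_sjoin_cons, pv_sjoin_nil]
          | inr hk0 =>
            have hne0 : ¬ i % ((tm : Int) + 1) = 0 := by
              intro h0
              have hdi : ((tm : Int) + 1) ∣ i := Int.dvd_of_emod_eq_zero h0
              have h1' : ((tm : Int) + 1) ∣ ((i + ((k' + 1 : Nat) : Int) - 1) - i) :=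
                Int.dvd_sub hdvd hdi
              have he : ((i + ((k' + 1 : Nat) : Int) - 1) - i) = ((k' : Int) + 1 - 1) := by
                push_cast; ring
              rw [he] at h1'
              have := Int.le_of_dvd (by omega) h1'
              omega
            simp only [wloop, hmod, hne0, beq_iff_eq, if_false]
            have hcons := (IH ws'.length (by simp [← hlen]) ws' rfl
                (fun x hx => hne x (by simp [hx]))).2
                k' hk0 (by omega) (cur ++ w) acc (i + 1)
                (pv_append_ne_empty cur w hcur) (by omega)
                (by
                  have he : (i + 1 + ((k' : Nat) : Int) - 1) = (i + ((k' + 1 : Nat) : Int) - 1) := by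
                    push_cast; ring
                  rw [he]; exact hdvd)
            rw [hcons]
            by_cases hlt : ws'.length < k'
            · rw [if_pos hlt, if_pos (by simp; omega)]
              simp [pv_sjoin_cons, String.append_assoc]
            · rw [if_neg hlt, if_neg (by simp; omega)]
              rw [List.take_succ_cons, List.drop_succ_cons]
              simp [pv_sjoin_cons, String.append_assoc]

-- count of B's range loop
def cntN (tm m : Nat) : Nat :=
  if (0 : Int) < (m : Int) then (((m : Int) - 0 + ((tm : Int) + 1) - 1) / ((tm : Int) + 1)).toNat else 0

theorem pv_cntN_succ (tm m : Nat) (h1 : 1 ≤ tm) (hm : 0 < m) :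
    cntN tm m = cntN tm (m - (tm + 1)) + 1 := by
  unfold cntN
  rw [if_pos (by exact_mod_cast hm)]
  by_cases hle : m ≤ tm + 1
  · rw [Nat.sub_eq_zero_of_le hle]
    rw [if_neg (by simp)]
    have he : ((m : Int) - 0 + ((tm : Int) + 1) - 1) = ((m : Int) - 1) + 1 * ((tm : Int) + 1) := by
      ring
    rw [he, Int.add_mul_ediv_right _ _ (by omega),
        Int.ediv_eq_zero_of_lt (by omega) (by omega)]
    simp
  · rw [if_pos (by omega)]
    have hc : ((m - (tm + 1) : Nat) : Int) = (m : Int) - ((tm : Int) + 1) := by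
      push_cast [Nat.cast_sub (by omega : tm + 1 ≤ m)]; ring
    rw [hc]
    have he : ((m : Int) - 0 + ((tm : Int) + 1) - 1)
        = ((m : Int) - ((tm : Int) + 1) - 0 + ((tm : Int) + 1) - 1) + 1 * ((tm : Int) + 1) := by
      ring
    rw [he, Int.add_mul_ediv_right _ _ (by omega)]
    have hnn : 0 ≤ ((m : Int) - ((tm : Int) + 1) - 0 + ((tm : Int) + 1) - 1) / ((tm : Int) + 1) :=
      Int.ediv_nonneg (by omega) (by omega)
    omega

-- B's chunk map equals the recursive chunks
theorem pv_bmap (tm : Nat) (h1 : 1 ≤ tm) :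
    ∀ (n : Nat) (ws : List String), ws.length = n →
      (List.range (cntN tm n)).map
        (fun k => PySem.Str.join "" (List.take (tm + 1) (List.drop ((tm + 1) * k) ws)))
        = chunks tm ws := by
  intro n
  induction n using Nat.strong_induction_on with
  | _ n IH =>
    intro ws hlen
    cases ws with
    | nil =>
      subst hlen
      simp [cntN, chunks]
    | cons w ws' =>
      have hlen' : ws'.length + 1 = n := by simpa using hlen
      have hn : 0 < n := by omega
      rw [pv_cntN_succ tm n h1 hn]
      rw [List.range_succ_eq_map, List.map_cons, List.map_map]
      rw [chunks]
      congr 1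
      have hIH := IH (ws'.length - tm) (by omega) (List.drop tm ws') (by simp)
      rw [show ws'.length - tm = n - (tm + 1) by omega] at hIH
      rw [← hIH]
      apply List.map_congr_left
      intro k _
      simp only [Function.comp_apply, Nat.succ_eq_add_one]
      congr 2
      rw [← List.drop_succ_cons (a := w) (l := ws') (i := tm), List.drop_drop]
      congr 1
      ring

-- glue: A's loop = B's range/slice pass, for chunk size T = tm+1
theorem pv_glue (sampleNames : List (String × String)) (tm : Nat) (T : Int)
    (h1 : 1 ≤ tm) (hT : T = (tm : Int) + 1) (samples : List String) :
    gssnA_loop sampleNames T samples 1 "" [] =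
    (PySem.List.pyRange 0 (PySem.List.len ((PySem.List.enumerate samples 1).map (gssnFmt sampleNames))) T).foldl
      (fun acc j => acc ++ [PySem.Str.join "" (PySem.List.slice ((PySem.List.enumerate samples 1).map (gssnFmt sampleNames)) (some j) (some (j + T)))]) [] := by
  subst hT
  set ws := (PySem.List.enumerate samples 1).map (gssnFmt sampleNames) with hws
  have hne : ∀ w ∈ ws, w ≠ "" := by
    intro w hw
    rw [hws] at hw
    obtain ⟨p, _, rfl⟩ := List.mem_map.mp hw
    exact pv_fmt_ne sampleNames p
  rw [pv_Aloop_eq_wloop, ← hws]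
  rw [(pv_wloop_chunks tm h1 ws.length ws rfl hne).1 1 [] (by omega) (by norm_num)]
  rw [PySem.List.foldl_append_singleton_eq_map]
  rw [PySem.List.len_eq, PySem.List.pyRange_of_pos 0 (ws.length : Int) (by omega), List.map_map]
  simp only [List.nil_append]
  have hcnt : (if (0 : Int) < (ws.length : Int)
      then (((ws.length : Int) - 0 + ((tm : Int) + 1) - 1) / ((tm : Int) + 1)).toNat else 0)
      = cntN tm ws.length := rfl
  rw [hcnt]
  rw [← pv_bmap tm h1 ws.length ws rfl]
  apply List.map_congr_left
  intro k _
  simp only [Function.comp_apply]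
  congr 1
  rw [show ((0 : Int) + ((tm : Int) + 1) * (k : Int)) = (((tm + 1) * k : Nat) : Int) from by push_cast; ring]
  rw [show ((((tm + 1) * k : Nat) : Int) + ((tm : Int) + 1)) = ((((tm + 1) * k : Nat) : Int) + ((tm + 1 : Nat) : Int)) from by push_cast; ring]
  exact (PySem.List.slice_natCast_add ws ((tm + 1) * k) (tm + 1)).symm

-- ===== VERDICT (by name: the statement is the Claim_ definition above) =====
theorem generateSampleSectionNames_spec : Claim_equal_generateSampleSectionNames := by
  intro samples sampleNames unitType _
  unfold Spec_generateSampleSectionNames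
  simp only [generateSampleSectionNames, generateSampleSectionNames_alt]
  by_cases hu : unitType ∈ ([0, 1, 2] : List Int)
  · simp only [if_pos hu]
    exact pv_glue sampleNames 1 2 (by norm_num) (by norm_num) samples
  · simp only [if_neg hu]
    exact pv_glue sampleNames 3 4 (by norm_num) (by norm_num) samples
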